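-- pv_equiv track=rewrite | github.com/neridoro/Python_Store | ex7.py | in_both_category
-- ===== SOURCE A (Python) =====
-- def in_both_category(data):
--     needed_list = []
--     for item in data:
--         for name in item.keys():
--             needed_list.append(name)
--     new_list = []
--     copy_needed_list = needed_list.copy()
--     for item in copy_needed_list:
--         needed_list.remove(item)
--         if item in needed_list:
--             new_list.append(item)
--     return sorted(list(set(new_list)))
-- ===== SOURCE B (Python) =====
-- def in_both_category(data):
--     seen = set()
--     dup = set()
--     for item in data:
--         for name in item.keys():
--             if name in seen:
--                 dup.add(name)
--             else:
--                 seen.add(name)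
--     return sorted(dup)
-- ===== Notes on version B (the rewrite author's own statement) =====
-- stated objective: faster
-- what changed: Single pass maintaining two sets (seen/dup) instead of building the full multiplicity list and doing A's nested remove-then-membership scan over it.
import Mathlib
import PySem

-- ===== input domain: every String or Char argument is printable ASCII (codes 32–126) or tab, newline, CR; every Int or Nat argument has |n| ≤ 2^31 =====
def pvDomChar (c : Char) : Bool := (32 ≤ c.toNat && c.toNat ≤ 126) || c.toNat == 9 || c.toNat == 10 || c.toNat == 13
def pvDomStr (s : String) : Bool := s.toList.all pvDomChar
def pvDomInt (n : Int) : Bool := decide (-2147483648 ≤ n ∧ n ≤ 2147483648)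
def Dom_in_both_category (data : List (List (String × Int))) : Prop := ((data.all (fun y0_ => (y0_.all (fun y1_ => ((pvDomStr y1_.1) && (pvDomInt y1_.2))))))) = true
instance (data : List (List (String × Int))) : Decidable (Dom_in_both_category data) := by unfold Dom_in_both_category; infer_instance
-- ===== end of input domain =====

-- B replaces A's multiplicity list + nested remove-and-recheck scan by one pass over the
-- keys maintaining two sets (seen/dup); objective: faster (O(n^2) -> O(n log n)).


-- ===== PORT A =====
-- 'for item in copy_needed_list: needed_list.remove(item); if item in needed_list: new_list.append(item)'
-- ('.getD needed' only totalizes remove?: the removed element is always present since the copy equals the list)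
def pvALoop : List String → List String → List String → List String
  | [], _needed, newl => newl
  | x :: rest, needed, newl =>
      let needed' := (PySem.List.remove? needed x).getD needed
      pvALoop rest needed' (if needed'.contains x then newl ++ [x] else newl)

def in_both_category (data : List (List (String × Int))) : List String :=
  let needed_list := data.foldl (fun acc item =>
    (PySem.Dict.mk item).keys.foldl (fun acc2 name => acc2 ++ [name]) acc) []
  let new_list := pvALoop needed_list needed_list []
  PySem.List.sorted (PySem.Set.ofList new_list) (fun x => x) false

-- ===== PORT B =====
def in_both_category_alt (data : List (List (String × Int))) : List String :=
  let st := data.foldl (fun (st : PySem.Set String × PySem.Set String) item =>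
    (PySem.Dict.mk item).keys.foldl (fun st2 name =>
      if PySem.Set.contains st2.1 name then (st2.1, PySem.Set.add st2.2 name)
      else (PySem.Set.add st2.1 name, st2.2)) st) (PySem.Set.empty, PySem.Set.empty)
  PySem.List.sorted st.2 (fun x => x) false

-- ===== PRECONDITION & SPEC =====
def Spec_in_both_category (data : List (List (String × Int))) (out : List String) : Prop := out = in_both_category_alt data
instance (data : List (List (String × Int))) (out : List String) : Decidable (Spec_in_both_category data out) := by unfold Spec_in_both_category; infer_instance

-- ===== CLAIM (what is proved, stated in full; the proofs are below) =====
def Claim_equal_in_both_category : Prop := ∀ (data : List (List (String × Int))), Dom_in_both_category data → Spec_in_both_category data (in_both_category data)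

-- ===== LEMMAS AND PROOFS =====

-- A's needed_list is the concatenation of all key lists
lemma needed_eq (data : List (List (String × Int))) : ∀ (acc : List String),
    data.foldl (fun acc item =>
      (PySem.Dict.mk item).keys.foldl (fun acc2 name => acc2 ++ [name]) acc) acc
    = acc ++ data.flatMap (fun item => (PySem.Dict.mk item).keys) := by
  induction data with
  | nil => intro acc; simp
  | cons d rest ih =>
      intro acc
      rw [List.foldl_cons, ih, PySem.List.foldl_append_singleton_eq_self, List.flatMap_cons,
        List.append_assoc]

-- membership in A's new_list: exactly the keys occurring at least twice
lemma mem_pvALoop (xs : List String) : ∀ (newl : List String) (y : String),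
    y ∈ pvALoop xs xs newl ↔ y ∈ newl ∨ 2 ≤ xs.count y := by
  induction xs with
  | nil => intro newl y; simp [pvALoop]
  | cons x rest ih =>
      intro newl y
      rw [show pvALoop (x :: rest) (x :: rest) newl
          = pvALoop rest rest (if rest.contains x then newl ++ [x] else newl) by
        simp [pvALoop]]
      rw [ih]
      by_cases hyx : y = x
      · subst hyx
        rw [List.count_cons_self]
        by_cases hx : y ∈ rest
        · rw [if_pos (by simpa using hx)]
          have h1 : 1 ≤ rest.count y := List.count_pos_iff.mpr hx
          simp only [List.mem_append, List.mem_singleton]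
          constructor
          · rintro ((h | h) | h)
            · exact Or.inl h
            · right; omega
            · right; omega
          · rintro (h | h)
            · exact Or.inl (Or.inl h)
            · left; right; trivial
        · rw [if_neg (by simpa using hx)]
          have h0 : rest.count y = 0 := List.count_eq_zero.mpr hx
          constructor
          · rintro (h | h)
            · exact Or.inl h
            · omega
          · rintro (h | h)
            · exact Or.inl h
            · omega
      · rw [List.count_cons_of_ne (Ne.symm hyx)]
        split_ifs with h
        · simp [List.mem_append, hyx]
        · rfl

-- the single-pass step function of B, on the flattened key list
def pvBStep (st : PySem.Set String × PySem.Set String) (name : String) :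
    PySem.Set String × PySem.Set String :=
  if PySem.Set.contains st.1 name then (st.1, PySem.Set.add st.2 name)
  else (PySem.Set.add st.1 name, st.2)

lemma mem_bFold (L : List String) : ∀ (seen dup : PySem.Set String) (y : String),
    y ∈ (L.foldl pvBStep (seen, dup)).2 ↔ y ∈ dup ∨ (y ∈ seen ∧ y ∈ L) ∨ 2 ≤ L.count y := by
  induction L with
  | nil => intro seen dup y; simp
  | cons x rest ih =>
      intro seen dup y
      rw [List.foldl_cons]
      by_cases hx : x ∈ seen
      · rw [show pvBStep (seen, dup) x = (seen, PySem.Set.add dup x) by simp [pvBStep, hx]]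
        rw [ih]
        by_cases hyx : y = x
        · subst hyx
          simp only [PySem.Set.mem_add, List.mem_cons]
          constructor
          · rintro ((h | h) | h | h)
            · exact Or.inl h
            · exact Or.inr (Or.inl ⟨hx, Or.inl trivial⟩)
            · exact Or.inr (Or.inl ⟨h.1, Or.inr h.2⟩)
            · right; right; rw [List.count_cons_self]; omega
          · intro _; left; right; trivial
        · rw [List.count_cons_of_ne (Ne.symm hyx)]
          simp [PySem.Set.mem_add, hyx, List.mem_cons]
      · rw [show pvBStep (seen, dup) x = (PySem.Set.add seen x, dup) by simp [pvBStep, hx]]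
        rw [ih]
        by_cases hyx : y = x
        · subst hyx
          rw [List.count_cons_self]
          simp only [PySem.Set.mem_add, List.mem_cons]
          constructor
          · rintro (h | h | h)
            · exact Or.inl h
            · rcases h.1 with hs | _
              · exact absurd hs hx
              · right; right; have : 1 ≤ rest.count y := List.count_pos_iff.mpr h.2; omega
            · right; right; omega
          · rintro (h | h | h)
            · exact Or.inl h
            · exact absurd h.1 hx
            · by_cases hm : y ∈ rest
              · exact Or.inr (Or.inl ⟨Or.inr trivial, hm⟩)
              · have h0 : rest.count y = 0 := List.count_eq_zero.mpr hm; omega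
        · rw [List.count_cons_of_ne (Ne.symm hyx)]
          simp [PySem.Set.mem_add, hyx, List.mem_cons]

lemma nodup_bFold (L : List String) : ∀ (seen dup : PySem.Set String),
    dup.Nodup → (L.foldl pvBStep (seen, dup)).2.Nodup := by
  induction L with
  | nil => intro _ _ h; simpa using h
  | cons x rest ih =>
      intro seen dup h
      rw [List.foldl_cons]
      unfold pvBStep
      split
      · exact ih _ _ (PySem.Set.nodup_add dup x h)
      · exact ih _ _ h

-- B's nested loop over data is the single fold of pvBStep over the flattened key list
lemma bfold_eq (data : List (List (String × Int))) :
    data.foldl (fun (st : PySem.Set String × PySem.Set String) item =>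
      (PySem.Dict.mk item).keys.foldl (fun st2 name =>
        if PySem.Set.contains st2.1 name then (st2.1, PySem.Set.add st2.2 name)
        else (PySem.Set.add st2.1 name, st2.2)) st) (PySem.Set.empty, PySem.Set.empty)
    = (data.flatMap (fun item => (PySem.Dict.mk item).keys)).foldl pvBStep
        (PySem.Set.empty, PySem.Set.empty) :=
  Eq.symm (List.foldl_flatMap ..)

-- ===== VERDICT (by name: the statement is the Claim_ definition above) =====
theorem in_both_category_spec : Claim_equal_in_both_category := by
  intro data _
  unfold Spec_in_both_category in_both_category in_both_category_alt
  rw [needed_eq, bfold_eq]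
  apply PySem.List.sorted_eq_sorted_of_perm _ _ _ (fun a b h => h)
  rw [List.perm_ext_iff_of_nodup (PySem.Set.nodup_ofList _)
      (nodup_bFold _ PySem.Set.empty PySem.Set.empty List.nodup_nil)]
  intro y
  rw [PySem.Set.mem_ofList, mem_pvALoop, mem_bFold]
  simp only [PySem.Set.empty, List.not_mem_nil, false_or, false_and, List.nil_append]
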